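-- pv_equiv track=rewrite | github.com/freebsd/mfctracker | mfctracker/views.py | commit_msg_revisions
-- ===== SOURCE A (Python) =====
-- def commit_msg_revisions(revisions):
--     result = []
--
--     if len(revisions) == 0:
--         return result
--
--     range_start = revisions[0]
--     range_end = revisions[0]
--
--     i = 1
--     while i < len(revisions):
--         if revisions[i] - 1 == range_end:
--             range_end = revisions[i]
--         else:
--             if range_start == range_end:
--                 result.append('r{}'.format(range_start))
--             else:
--                 result.append('r{}-r{}'.format(range_start, range_end))
--             range_start = range_end = revisions[i]
--         i += 1
--
--     if range_start == range_end:
--         result.append('r{}'.format(range_start))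
--     else:
--         result.append('r{}-r{}'.format(range_start, range_end))
--     return ', '.join(result)
-- ===== SOURCE B (Python) =====
-- def commit_msg_revisions(revisions):
--     if len(revisions) == 0:
--         return []
--     # a run STARTS at the first element and at any element not preceded by its value-1;
--     # a run ENDS at any element not followed by its value+1 and at the last element.
--     starts = [revisions[0]] + [x for p, x in zip(revisions, revisions[1:]) if x != p + 1]
--     ends = [p for p, x in zip(revisions, revisions[1:]) if x != p + 1] + [revisions[-1]]
--     return ', '.join('r{}'.format(s) if s == e else 'r{}-r{}'.format(s, e)
--                      for s, e in zip(starts, ends))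
-- ===== Notes on version B (the rewrite author's own statement) =====
-- stated objective: alternative
-- what changed: B has no stateful range-tracking scan: it computes run starts (elements not preceded by value-1) and run ends (elements not followed by value+1) as two independent filtered comprehensions over adjacent pairs and zips them positionally into formatted ranges, instead of A's single loop that mutates range_start/range_end and emits on each break.
-- outside the precondition, e.g. on commit_msg_revisions([]): A returns [], B returns []
import Mathlib
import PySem

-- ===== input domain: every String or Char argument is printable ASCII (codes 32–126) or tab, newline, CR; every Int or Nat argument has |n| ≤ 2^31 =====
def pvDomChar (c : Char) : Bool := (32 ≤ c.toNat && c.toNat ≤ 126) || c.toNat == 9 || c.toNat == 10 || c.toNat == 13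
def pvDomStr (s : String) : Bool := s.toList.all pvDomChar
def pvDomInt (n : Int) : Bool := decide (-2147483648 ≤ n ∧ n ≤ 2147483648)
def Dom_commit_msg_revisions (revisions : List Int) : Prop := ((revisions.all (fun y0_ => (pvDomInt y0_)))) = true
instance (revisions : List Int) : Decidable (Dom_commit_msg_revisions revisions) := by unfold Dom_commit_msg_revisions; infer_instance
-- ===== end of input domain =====

-- B computes run starts and run ends as two independent filtered lists over adjacent pairs
-- and zips them, instead of A's stateful emit-on-break scan (objective: alternative, same cost).

-- ===== PORT A =====
-- 'r{}'.format(s) / 'r{}-r{}'.format(s, e)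
def pvFmtA (s e : Int) : String :=
  if s = e then "r" ++ PySem.Int.toStr s
  else "r" ++ PySem.Int.toStr s ++ "-r" ++ PySem.Int.toStr e

-- A's while-loop over indices 1..len-1, state = (result, range_start, range_end)
def pvLoopA : List Int → List String → Int → Int → List String × Int × Int
  | [], res, rs, re => (res, rs, re)
  | x :: t, res, rs, re =>
      if x - 1 = re then pvLoopA t res rs x
      else pvLoopA t (res ++ [pvFmtA rs re]) x x

def commit_msg_revisions (revisions : List Int) : String :=
  match revisions with
  | [] => ""   -- Python A returns the empty LIST here (not a string); excluded by Pre_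
  | r :: rest =>
      let st := pvLoopA rest [] r r
      PySem.Str.join ", " (st.1 ++ [pvFmtA st.2.1 st.2.2])

-- ===== PORT B =====
-- the conditional format expression of Source B's join comprehension
def pvFmtB (s e : Int) : String :=
  if s = e then "r" ++ PySem.Int.toStr s
  else "r" ++ PySem.Int.toStr s ++ "-r" ++ PySem.Int.toStr e

def commit_msg_revisions_alt (revisions : List Int) : String :=
  match revisions with
  | [] => ""   -- Python B returns the empty LIST here (not a string); excluded by Pre_
  | r :: _ =>
      -- zip(revisions, revisions[1:]) = revisions.zip revisions.tail; the two comprehensions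
      -- are map-after-filter; revisions[-1] is pyGetD at -1 (in range: list nonempty)
      let starts := r ::
        ((revisions.zip revisions.tail).filter (fun pq => pq.2 ≠ pq.1 + 1)).map Prod.snd
      let ends :=
        ((revisions.zip revisions.tail).filter (fun pq => pq.2 ≠ pq.1 + 1)).map Prod.fst
          ++ [PySem.List.pyGetD revisions (-1) 0]
      PySem.Str.join ", " ((starts.zip ends).map (fun se => pvFmtB se.1 se.2))

-- ===== PRECONDITION & SPEC =====
-- Pre_ excludes only the empty list, on which both Pythons return [] — a list, not a value of
-- the declared String return type.
def Pre_commit_msg_revisions (revisions : List Int) : Prop := revisions ≠ []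
instance (revisions : List Int) : Decidable (Pre_commit_msg_revisions revisions) := by
  unfold Pre_commit_msg_revisions; infer_instance
def pvWitness_commit_msg_revisions : List Int := [1, 2, 3, 7]

def Spec_commit_msg_revisions (revisions : List Int) (out : String) : Prop :=
  out = commit_msg_revisions_alt revisions
instance (revisions : List Int) (out : String) : Decidable (Spec_commit_msg_revisions revisions out) := by
  unfold Spec_commit_msg_revisions; infer_instance

-- ===== CLAIM =====
def Claim_equal_commit_msg_revisions : Prop :=
  ∀ (revisions : List Int), Dom_commit_msg_revisions revisions →
    Pre_commit_msg_revisions revisions →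
    Spec_commit_msg_revisions revisions (commit_msg_revisions revisions)

-- ===== LEMMAS AND PROOFS =====

-- proof-side characterisation: the list of maximal consecutive runs, as (start, end) pairs
def pvRuns : Int → Int → List Int → List (Int × Int)
  | s, e, [] => [(s, e)]
  | s, e, x :: t => if x = e + 1 then pvRuns s x t else (s, e) :: pvRuns x x t

theorem pvLoop_eq_runs (xs : List Int) : ∀ (res : List String) (rs re : Int),
    (pvLoopA xs res rs re).1 ++ [pvFmtA (pvLoopA xs res rs re).2.1 (pvLoopA xs res rs re).2.2]
      = res ++ (pvRuns rs re xs).map (fun p => pvFmtA p.1 p.2) := by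
  induction xs with
  | nil => intro res rs re; simp [pvLoopA, pvRuns]
  | cons x t ih =>
      intro res rs re
      by_cases h : x = re + 1
      · simp [pvLoopA, pvRuns, h, ih]
      · have h' : ¬ (x - 1 = re) := by omega
        simp only [pvLoopA, if_neg h', pvRuns, if_neg h]
        rw [ih (res ++ [pvFmtA rs re]) x x]
        simp

theorem pvRuns_fst (t : List Int) : ∀ (s e : Int),
    (pvRuns s e t).map Prod.fst
      = s :: (((e :: t).zip t).filter (fun pq => pq.2 ≠ pq.1 + 1)).map Prod.snd := by
  induction t with
  | nil => intro s e; simp [pvRuns]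
  | cons x t' ih =>
      intro s e
      by_cases h : x = e + 1
      · simp [pvRuns, h, ih]
      · simp [pvRuns, h, ih]

theorem pvLast_cons (a b : Int) (l : List Int) :
    PySem.List.pyGetD (a :: b :: l) (-1) (0 : Int) = PySem.List.pyGetD (b :: l) (-1) 0 := by
  simp [PySem.List.pyGetD_neg_one, List.getLast_cons]

theorem pvRuns_snd (t : List Int) : ∀ (s e : Int),
    (pvRuns s e t).map Prod.snd
      = (((e :: t).zip t).filter (fun pq => pq.2 ≠ pq.1 + 1)).map Prod.fst
          ++ [PySem.List.pyGetD (e :: t) (-1) 0] := by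
  induction t with
  | nil => intro s e; simp [pvRuns, PySem.List.pyGetD_neg_one]
  | cons x t' ih =>
      intro s e
      by_cases h : x = e + 1
      · simp [pvRuns, h, ih, pvLast_cons]
      · simp [pvRuns, h, ih, pvLast_cons]

-- ===== VERDICT =====
theorem commit_msg_revisions_spec : Claim_equal_commit_msg_revisions := by
  intro revisions _ hpre
  unfold Spec_commit_msg_revisions
  match revisions with
  | [] => exact absurd rfl hpre
  | r :: rest =>
      simp only [commit_msg_revisions, commit_msg_revisions_alt, List.tail_cons]
      rw [pvLoop_eq_runs rest [] r r, ← pvRuns_fst rest r r, ← pvRuns_snd rest r r,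
          List.zip_map']
      simp [pvFmtA, pvFmtB]
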